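-- pv_equiv track=rewrite | github.com/HaroldRoy/100-Days-of-Python | 92_yield_serie.py | num_serie
-- ===== SOURCE A (Python) =====
-- def num_serie(limite):
--     i = 0
--
--     count = 0
--     direction = 1
--
--     while i < limite:
--         count += direction
--         yield count
--         if count == 3:
--             direction = -1
--         elif count == 1:
--             direction = +1
--         i += 1
-- ===== SOURCE B (Python) =====
-- def num_serie(limite):
--     i = 0
--     while i < limite:
--         yield (1, 2, 3, 2)[i % 4]
--         i += 1
-- ===== Notes on version B (the rewrite author's own statement) =====
-- stated objective: simpler
-- what changed: Replaces the count/direction state machine with a direct closed-form lookup of the fixed period-4 cycle (1,2,3,2) indexed by position i % 4.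
import Mathlib
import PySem

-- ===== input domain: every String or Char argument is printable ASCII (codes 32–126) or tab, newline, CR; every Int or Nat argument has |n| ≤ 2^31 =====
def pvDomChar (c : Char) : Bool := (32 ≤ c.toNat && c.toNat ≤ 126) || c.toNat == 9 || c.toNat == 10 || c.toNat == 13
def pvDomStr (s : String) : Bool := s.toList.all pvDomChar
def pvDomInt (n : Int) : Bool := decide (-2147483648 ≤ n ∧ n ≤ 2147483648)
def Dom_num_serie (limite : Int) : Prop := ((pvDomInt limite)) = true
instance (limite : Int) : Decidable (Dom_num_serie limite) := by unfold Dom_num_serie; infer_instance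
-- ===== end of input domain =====

-- B replaces A's count/direction state machine with a direct lookup of the fixed
-- period-4 cycle (1,2,3,2) by position; same values, no running state (objective: simpler).

-- ===== PORT A =====
-- while i < limite: the loop runs limite.toNat times (0 if limite ≤ 0); state (count, direction)
def numSerieLoopA : Nat → Int → Int → List Int
  | 0, _, _ => []
  | n + 1, count, direction =>
      let count' := count + direction
      count' :: numSerieLoopA n count'
        (if count' = 3 then -1 else if count' = 1 then 1 else direction)

def num_serie (limite : Int) : List Int := numSerieLoopA limite.toNat 0 1

-- ===== PORT B =====
-- yield (1,2,3,2)[i % 4]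
def numSeriePick (i : Nat) : Int :=
  match i % 4 with
  | 0 => 1
  | 1 => 2
  | 2 => 3
  | _ => 2

def numSerieLoopB : Nat → Nat → List Int
  | 0, _ => []
  | n + 1, i => numSeriePick i :: numSerieLoopB n (i + 1)

def num_serie_alt (limite : Int) : List Int := numSerieLoopB limite.toNat 0

-- ===== PRECONDITION & SPEC =====
def Spec_num_serie (limite : Int) (out : List Int) : Prop := out = num_serie_alt limite
instance (limite : Int) (out : List Int) : Decidable (Spec_num_serie limite out) := by unfold Spec_num_serie; infer_instance

-- ===== CLAIM (what is proved, stated in full; the proofs are below) =====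
def Claim_equal_num_serie : Prop := ∀ (limite : Int), Dom_num_serie limite → Spec_num_serie limite (num_serie limite)

-- ===== LEMMAS AND PROOFS =====

-- the reachable loop states of A at a position of phase p = i % 4
def numSerieOk (p : Nat) (count direction : Int) : Prop :=
  (p % 4 = 0 ∧ ((count = 0 ∧ direction = 1) ∨ (count = 2 ∧ direction = -1))) ∨
  (p % 4 = 1 ∧ count = 1 ∧ direction = 1) ∨
  (p % 4 = 2 ∧ count = 2 ∧ direction = 1) ∨
  (p % 4 = 3 ∧ count = 3 ∧ direction = -1)

theorem numSerieLoop_eq (n : Nat) :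
    ∀ (p : Nat) (count direction : Int), numSerieOk p count direction →
      numSerieLoopA n count direction = numSerieLoopB n p := by
  induction n with
  | zero => intro p c d _; rfl
  | succ n ih =>
    intro p c d hok
    rcases hok with ⟨hp, ⟨h1, h2⟩ | ⟨h1, h2⟩⟩ | ⟨hp, h1, h2⟩ | ⟨hp, h1, h2⟩ | ⟨hp, h1, h2⟩ <;>
        subst h1 <;> subst h2 <;>
        simp only [numSerieLoopA, numSerieLoopB, numSeriePick, hp] <;> norm_num
    · exact ih (p + 1) _ _ (Or.inr (Or.inl ⟨by omega, rfl, rfl⟩))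
    · exact ih (p + 1) _ _ (Or.inr (Or.inl ⟨by omega, rfl, rfl⟩))
    · exact ih (p + 1) _ _ (Or.inr (Or.inr (Or.inl ⟨by omega, rfl, rfl⟩)))
    · exact ih (p + 1) _ _ (Or.inr (Or.inr (Or.inr ⟨by omega, rfl, rfl⟩)))
    · exact ih (p + 1) _ _ (Or.inl ⟨by omega, Or.inr ⟨rfl, rfl⟩⟩)

-- ===== VERDICT (by name: the statement is the Claim_ definition above) =====
theorem num_serie_spec : Claim_equal_num_serie := by
  intro limite _
  unfold Spec_num_serie num_serie num_serie_alt
  exact numSerieLoop_eq _ 0 0 1 (Or.inl ⟨rfl, Or.inl ⟨rfl, rfl⟩⟩)
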